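-- pv_equiv track=rewrite | github.com/ivi982010/SySdL-TPs | Lexer.py | a_OpRel6
-- ===== SOURCE A (Python) =====
-- def a_OpRel6(tokens, acu):
-- 	s=0;
-- 	for c in acu:
-- 		if s==0 and c=='!':
-- 			s=1
-- 		elif s==1 and c=='=':
-- 			s=2
-- 		else:
-- 			s=-1
-- 			break
-- 	if s==2:
-- 		tokens.append(("<OpRel>",acu))
-- 	return s==2
-- ===== SOURCE B (Python) =====
-- def a_OpRel6(tokens, acu):
--     ok = list(acu) == ['!', '=']
--     if ok:
--         tokens.append(("<OpRel>", acu))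
--     return ok
-- ===== Notes on version B (the rewrite author's own statement) =====
-- stated objective: simpler
-- what changed: Replaces the char-by-char state-machine scan with one eager materialize-and-compare of the input against the target sequence ['!','='].
import Mathlib
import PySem

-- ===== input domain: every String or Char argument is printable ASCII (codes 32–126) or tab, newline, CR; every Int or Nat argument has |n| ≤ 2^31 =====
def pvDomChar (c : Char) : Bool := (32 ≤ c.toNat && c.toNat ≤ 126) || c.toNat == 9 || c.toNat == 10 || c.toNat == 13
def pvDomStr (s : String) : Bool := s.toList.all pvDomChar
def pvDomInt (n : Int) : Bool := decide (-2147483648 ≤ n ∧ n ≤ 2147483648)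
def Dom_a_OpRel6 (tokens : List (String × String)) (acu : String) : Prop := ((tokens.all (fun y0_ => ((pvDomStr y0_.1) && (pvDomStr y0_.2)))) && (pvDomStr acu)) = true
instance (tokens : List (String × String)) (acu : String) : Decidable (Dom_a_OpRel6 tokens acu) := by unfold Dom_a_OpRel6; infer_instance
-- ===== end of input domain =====

-- B drops A's state machine for a single materialize-and-compare; both Pythons append to
-- `tokens` on success (the same mutation), the equivalence proved here is about the return value.

-- ===== PORT A =====
-- the for-loop over acu with the early break (s := -1; break)
def a_OpRel6_loop : List Char → Int → Int
  | [], s => s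
  | c :: cs, s =>
    if s == 0 && c == '!' then a_OpRel6_loop cs 1
    else if s == 1 && c == '=' then a_OpRel6_loop cs 2
    else (-1)

def a_OpRel6 (tokens : List (String × String)) (acu : String) : Bool :=
  a_OpRel6_loop acu.toList 0 == 2

-- ===== PORT B =====
def a_OpRel6_alt (tokens : List (String × String)) (acu : String) : Bool :=
  acu.toList == ['!', '=']

-- ===== PRECONDITION & SPEC =====
def Spec_a_OpRel6 (tokens : List (String × String)) (acu : String) (out : Bool) : Prop := out = a_OpRel6_alt tokens acu
instance (tokens : List (String × String)) (acu : String) (out : Bool) : Decidable (Spec_a_OpRel6 tokens acu out) := by unfold Spec_a_OpRel6; infer_instance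

-- ===== CLAIM (what is proved, stated in full; the proofs are below) =====
def Claim_equal_a_OpRel6 : Prop := ∀ (tokens : List (String × String)) (acu : String), Dom_a_OpRel6 tokens acu → Spec_a_OpRel6 tokens acu (a_OpRel6 tokens acu)

-- ===== LEMMAS AND PROOFS =====
theorem a_OpRel6_loop_char : ∀ (l : List Char),
    (a_OpRel6_loop l 0 == 2) = (l == ['!', '=']) := by
  intro l
  match l with
  | [] => decide
  | [c] =>
    simp only [a_OpRel6_loop]
    by_cases h : c = '!' <;> simp [h]
  | c :: d :: rest =>
    simp only [a_OpRel6_loop]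
    by_cases hc : c = '!'
    · by_cases hd : d = '='
      · cases rest with
        | nil => simp [hc, hd, a_OpRel6_loop]
        | cons e es => simp [hc, hd, a_OpRel6_loop]
      · simp [hc, hd, a_OpRel6_loop]
    · simp [hc, a_OpRel6_loop]

-- ===== VERDICT (by name: the statement is the Claim_ definition above) =====
theorem a_OpRel6_spec : Claim_equal_a_OpRel6 := by
  intro tokens acu _
  unfold Spec_a_OpRel6 a_OpRel6 a_OpRel6_alt
  exact a_OpRel6_loop_char acu.toList
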